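-- pv_equiv track=rewrite | github.com/DiegoDuarte90/3d.iego-app | views/stock.py | _subtipos_por_categoria
-- ===== SOURCE A (Python) =====
-- from collections import defaultdict
--
-- def _subtipos_por_categoria(items: list[dict]) -> dict[str, list[tuple[str, int]]]:
--     out = defaultdict(lambda: defaultdict(int))
--     for it in items:
--         cat = it.get("categoria") or "__SIN__"
--         sub = it.get("subtipo") or "__SIN__"
--         out[cat][sub] += 1
--     ordered = {}
--     for cat, d in out.items():
--         subs_sorted = sorted([(k, v) for k, v in d.items() if k != "__SIN__"], key=lambda x: x[0].upper())
--         if "__SIN__" in d: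
--             subs_sorted.append(("__SIN__", d["__SIN__"]))
--         ordered[cat] = subs_sorted
--     return ordered
-- ===== SOURCE B (Python) =====
-- def _subtipos_por_categoria(items: list[dict]) -> dict[str, list[tuple[str, int]]]:
--     # Dictionary-free re-implementation: normalise once to (cat, sub) pairs, then
--     # answer each first-appearance category by nested list scans (dedup + count).
--     pairs = [
--         ((it.get("categoria") or "__SIN__"), (it.get("subtipo") or "__SIN__"))
--         for it in items
--     ]
--     cats = []
--     for c, _ in pairs:
--         if c not in cats:
--             cats.append(c)
--     result = {}
--     for c in cats:
--         subs = [s for cc, s in pairs if cc == c]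
--         distinct = []
--         for s in subs:
--             if s not in distinct:
--                 distinct.append(s)
--         entries = sorted(
--             [(s, subs.count(s)) for s in distinct if s != "__SIN__"],
--             key=lambda p: p[0].upper(),
--         )
--         if "__SIN__" in distinct:
--             entries.append(("__SIN__", subs.count("__SIN__")))
--         result[c] = entries
--     return result
-- ===== Notes on version B (the rewrite author's own statement) =====
-- stated objective: alternative
-- what changed: Replaces A's hash-based nested defaultdict counting with a dictionary-free list algorithm: one normalisation pass to (cat, sub) pairs, then per first-appearance category a filter scan, list dedup and subs.count() to build each row.
import Mathlib
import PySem

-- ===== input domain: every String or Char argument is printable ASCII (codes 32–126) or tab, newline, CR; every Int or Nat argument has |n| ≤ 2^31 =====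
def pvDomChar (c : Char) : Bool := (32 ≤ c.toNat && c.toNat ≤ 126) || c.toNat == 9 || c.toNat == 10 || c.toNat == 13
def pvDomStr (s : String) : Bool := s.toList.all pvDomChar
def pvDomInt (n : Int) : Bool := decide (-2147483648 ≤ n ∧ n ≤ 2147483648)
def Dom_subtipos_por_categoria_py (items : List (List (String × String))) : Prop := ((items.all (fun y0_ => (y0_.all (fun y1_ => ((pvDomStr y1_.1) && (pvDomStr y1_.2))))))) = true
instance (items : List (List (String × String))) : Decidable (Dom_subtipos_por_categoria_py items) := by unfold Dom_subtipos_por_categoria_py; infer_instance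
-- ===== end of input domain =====

-- B replaces A's nested-defaultdict hash counting with a dictionary-free list algorithm
-- (normalise to pairs, then per-category filter/dedup/count scans); alternative structure, slower on big inputs.


-- shared helper: it.get(k) or "__SIN__"  (dict lookup = first match; "" is falsy)
def pvGetOr (it : List (String × String)) (k : String) : String :=
  match it.find? (fun p => p.1 == k) with
  | none => "__SIN__"
  | some p => if p.2 = "" then "__SIN__" else p.2

-- ===== PORT A =====
def subtipos_por_categoria_py (items : List (List (String × String))) : List (String × List (String × Int)) :=
  let out : PySem.Dict String (PySem.Dict String Int) :=
    items.foldl (fun out it =>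
      out.modify (pvGetOr it "categoria") PySem.Dict.empty
        (fun d => d.modify (pvGetOr it "subtipo") 0 (· + 1)))
      PySem.Dict.empty
  (out.items.foldl (fun ordered cd =>
      let subs_sorted := PySem.List.sorted (cd.2.items.filter (fun p => p.1 != "__SIN__"))
        (fun p => PySem.Str.upper p.1) false
      let subs_sorted := if cd.2.contains "__SIN__" then
          subs_sorted ++ [("__SIN__", cd.2.getD "__SIN__" 0)] else subs_sorted
      ordered.insert cd.1 subs_sorted)
    PySem.Dict.empty).items

-- ===== PORT B =====
-- 'if x not in acc: acc.append(x)' over a list is exactly PySem.Set.add (x in Python Source B)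
def subtipos_por_categoria_py_alt (items : List (List (String × String))) : List (String × List (String × Int)) :=
  let pairs := items.map (fun it => (pvGetOr it "categoria", pvGetOr it "subtipo"))
  let cats := pairs.foldl (fun acc p => PySem.Set.add acc p.1) []
  cats.map (fun c =>
    let subs := (pairs.filter (fun p => p.1 == c)).map (fun p => p.2)
    let distinct := subs.foldl (fun acc s => PySem.Set.add acc s) []
    let entries := PySem.List.sorted
        ((distinct.filter (fun s => s != "__SIN__")).map (fun s => (s, (subs.count s : Int))))
        (fun p => PySem.Str.upper p.1) false
    let entries := if "__SIN__" ∈ distinct then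
        entries ++ [("__SIN__", (subs.count "__SIN__" : Int))] else entries
    (c, entries))

-- ===== PRECONDITION & SPEC =====
def Spec_subtipos_por_categoria_py (items : List (List (String × String))) (out : List (String × List (String × Int))) : Prop := out = subtipos_por_categoria_py_alt items
instance (items : List (List (String × String))) (out : List (String × List (String × Int))) : Decidable (Spec_subtipos_por_categoria_py items out) := by unfold Spec_subtipos_por_categoria_py; infer_instance

-- ===== CLAIM (what is proved, stated in full; the proofs are below) =====
def Claim_equal_subtipos_por_categoria_py : Prop := ∀ (items : List (List (String × String))), Dom_subtipos_por_categoria_py items → Spec_subtipos_por_categoria_py items (subtipos_por_categoria_py items)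

-- ===== LEMMAS AND PROOFS =====

theorem pv_getD_foldl_modify {β κ ν : Type} [BEq κ] [LawfulBEq κ] [DecidableEq κ]
    (l : List β) (key : β → κ) (d0 : ν) (f : β → ν → ν) (d : PySem.Dict κ ν) (c : κ) :
    (l.foldl (fun d x => d.modify (key x) d0 (f x)) d).getD c d0
      = (l.filter (fun x => key x == c)).foldl (fun v x => f x v) (d.getD c d0) := by
  induction l generalizing d with
  | nil => rfl
  | cons x t ih =>
    simp only [List.foldl_cons, List.filter_cons]
    by_cases h : key x = c
    · subst h
      simp only [BEq.rfl, if_pos, List.foldl_cons]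
      rw [ih, PySem.Dict.getD_modify_self]
    · have hb : (key x == c) = false := by simp [h]
      simp only [hb, Bool.false_eq_true, if_false]
      rw [ih, PySem.Dict.getD_modify_of_ne _ _ _ (Ne.symm h)]

theorem pv_filter_beq_of_nodup {α : Type} [BEq α] [LawfulBEq α]
    (l : List α) (h : l.Nodup) (a : α) :
    l.filter (fun x => x == a) = if a ∈ l then [a] else [] := by
  induction l with
  | nil => simp
  | cons x t ih =>
    rcases List.nodup_cons.mp h with ⟨hx, ht⟩
    rw [List.filter_cons, ih ht]
    by_cases hxa : x = a
    · subst hxa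
      simp [List.mem_cons, hx]
    · have hb : (x == a) = false := by simp [hxa]
      simp [hb, List.mem_cons, Ne.symm hxa]

-- canonical intermediate form shared by both halves of the proof
def pvCat (it : List (String × String)) : String := pvGetOr it "categoria"
def pvSub (it : List (String × String)) : String := pvGetOr it "subtipo"
def pvT (items : List (List (String × String))) (c : String) : List String :=
  (items.filter (fun it => pvCat it == c)).map pvSub
def pvM (T : List String) : List (String × Int) :=
  (PySem.Set.ofList T).map (fun s => (s, (T.count s : Int)))
def pvFin (L : List (String × Int)) : List (String × Int) :=
  PySem.List.sorted (L.filter (fun p => p.1 != "__SIN__")) (fun p => PySem.Str.upper p.1) false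
    ++ L.filter (fun p => p.1 == "__SIN__")
def pvCanon (items : List (List (String × String))) : List (String × List (String × Int)) :=
  (PySem.Set.ofList (items.map pvCat)).map (fun c => (c, pvFin (pvM (pvT items c))))

def pvFinA (d : PySem.Dict String Int) : List (String × Int) :=
  let ss := PySem.List.sorted (d.items.filter (fun p => p.1 != "__SIN__"))
    (fun p => PySem.Str.upper p.1) false
  if d.contains "__SIN__" then ss ++ [("__SIN__", d.getD "__SIN__" 0)] else ss

-- pvM's sentinel rows
theorem pv_filter_sin (T : List String) :
    (pvM T).filter (fun p => p.1 == "__SIN__")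
      = if "__SIN__" ∈ T then [("__SIN__", (T.count "__SIN__" : Int))] else [] := by
  unfold pvM
  rw [List.filter_map]
  have : ((PySem.Set.ofList T).filter
      ((fun p => p.1 == "__SIN__") ∘ (fun s => (s, (T.count s : Int)))))
      = (PySem.Set.ofList T).filter (fun s => s == "__SIN__") := rfl
  rw [this, pv_filter_beq_of_nodup _ (PySem.Set.nodup_ofList T) _]
  by_cases hm : "__SIN__" ∈ T
  · rw [if_pos (by simpa [PySem.Set.mem_ofList] using hm), if_pos hm]
    rfl
  · rw [if_neg (by simpa [PySem.Set.mem_ofList] using hm), if_neg hm]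
    rfl

-- A's per-category finish on the counter equals the canonical finish
theorem pv_finA_eq (T : List String) :
    pvFinA (PySem.Dict.counter T) = pvFin (pvM T) := by
  have hitems : (PySem.Dict.counter T).items = pvM T := PySem.Dict.items_counter T
  unfold pvFinA
  rw [hitems, PySem.Dict.contains_counter, PySem.Dict.getD_counter]
  unfold pvFin
  by_cases hm : "__SIN__" ∈ T
  · rw [if_pos (by simpa using hm), pv_filter_sin, if_pos hm]
  · rw [if_neg (by simpa using hm), pv_filter_sin, if_neg hm, List.append_nil]

def pvPairs (items : List (List (String × String))) : List (String × String) :=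
  items.map (fun it => (pvCat it, pvSub it))
def pvOut (items : List (List (String × String))) : PySem.Dict String (PySem.Dict String Int) :=
  items.foldl (fun out it =>
      out.modify (pvCat it) PySem.Dict.empty
        (fun d => d.modify (pvSub it) 0 (· + 1)))
    PySem.Dict.empty

theorem pv_T_eq (items : List (List (String × String))) (c : String) :
    ((pvPairs items).filter (fun k => k.1 == c)).map (fun k => k.2) = pvT items c := by
  rw [pvPairs, List.filter_map, List.map_map]
  rfl

-- Port A equals the canonical form
theorem pvA_eq_canon (items : List (List (String × String))) :
    subtipos_por_categoria_py items = pvCanon items := by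
  have hnd : (pvOut items).keys.Nodup := by
    apply PySem.Dict.nodup_keys_foldl_modify_key items pvCat PySem.Dict.empty
      (fun _ it => fun d => d.modify (pvSub it) 0 (· + 1)) PySem.Dict.empty
    rw [PySem.Dict.keys_empty]
    exact List.nodup_nil
  have h0 : subtipos_por_categoria_py items
      = ((pvOut items).items.foldl (fun ordered cd => ordered.insert cd.1 (pvFinA cd.2))
          PySem.Dict.empty).items := rfl
  have h1 : ((pvOut items).items.foldl (fun ordered cd => ordered.insert cd.1 (pvFinA cd.2))
        PySem.Dict.empty).items
      = (pvOut items).items.map (fun cd => (cd.1, pvFinA cd.2)) := by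
    have := PySem.Dict.items_foldl_insert_fresh (pvOut items).items (fun cd => cd.1)
      (fun cd => pvFinA cd.2) PySem.Dict.empty
      (fun a _ => PySem.Dict.contains_empty a.1)
      (by simpa [PySem.Dict.keys] using hnd)
    simpa using this
  have hkeys : (pvOut items).keys = PySem.Set.ofList (items.map pvCat) := by
    rw [pvOut, PySem.Dict.keys_foldl_modify_key items pvCat PySem.Dict.empty
      (fun _ it => fun d => d.modify (pvSub it) 0 (· + 1)) PySem.Dict.empty,
      PySem.Dict.keys_empty, PySem.Set.update_nil_left]
  have hgetD : ∀ c, (pvOut items).getD c PySem.Dict.empty = PySem.Dict.counter (pvT items c) := by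
    intro c
    rw [pvOut, pv_getD_foldl_modify items pvCat PySem.Dict.empty
      (fun it => fun d => d.modify (pvSub it) 0 (· + 1)) PySem.Dict.empty c,
      PySem.Dict.getD_empty, pvT, PySem.Dict.counter_eq_foldl, List.foldl_map]
  rw [h0, h1, PySem.Dict.items_eq_map_keys (pvOut items) hnd PySem.Dict.empty, List.map_map,
    hkeys, pvCanon]
  apply List.map_congr_left
  intro c _
  simp only [Function.comp]
  rw [hgetD c, pv_finA_eq]

-- Port B equals the canonical form
theorem pvB_eq_canon (items : List (List (String × String))) :
    subtipos_por_categoria_py_alt items = pvCanon items := by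
  have hpairs : items.map (fun it => (pvGetOr it "categoria", pvGetOr it "subtipo"))
      = pvPairs items := rfl
  have hcats : (pvPairs items).foldl (fun acc p => PySem.Set.add acc p.1) []
      = PySem.Set.ofList (items.map pvCat) := by
    have h1 : (pvPairs items).foldl (fun acc p => PySem.Set.add acc p.1) []
        = ((pvPairs items).map (fun p => p.1)).foldl PySem.Set.add [] := by
      rw [List.foldl_map]
    have h2 : (pvPairs items).map (fun (p : String × String) => p.1) = items.map pvCat := by
      rw [pvPairs, List.map_map]; rfl
    rw [h1, h2, ← PySem.Set.ofList_eq_foldl]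
  show ((pvPairs items).foldl (fun acc p => PySem.Set.add acc p.1) []).map _ = _
  rw [hcats, pvCanon]
  apply List.map_congr_left
  intro c _
  simp only
  rw [hpairs, pv_T_eq items c]
  have hdistinct : (pvT items c).foldl (fun acc s => PySem.Set.add acc s) []
      = PySem.Set.ofList (pvT items c) := by
    rw [← PySem.Set.ofList_eq_foldl]
  rw [hdistinct]
  -- entries before the sentinel step: filter-then-map = map-then-filter
  have hentries : ((PySem.Set.ofList (pvT items c)).filter (fun s => s != "__SIN__")).map
        (fun s => (s, ((pvT items c).count s : Int)))
      = (pvM (pvT items c)).filter (fun p => p.1 != "__SIN__") := by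
    rw [pvM, List.filter_map]
    rfl
  rw [hentries]
  -- sentinel step
  by_cases hm : "__SIN__" ∈ PySem.Set.ofList (pvT items c)
  · have hmT : "__SIN__" ∈ pvT items c := by simpa [PySem.Set.mem_ofList] using hm
    rw [if_pos hm, pvFin, pv_filter_sin, if_pos hmT]
  · have hmT : "__SIN__" ∉ pvT items c := by simpa [PySem.Set.mem_ofList] using hm
    rw [if_neg hm, pvFin, pv_filter_sin, if_neg hmT, List.append_nil]

-- ===== VERDICT (by name: the statement is the Claim_ definition above) =====
theorem subtipos_por_categoria_py_spec : Claim_equal_subtipos_por_categoria_py := by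
  intro items _
  unfold Spec_subtipos_por_categoria_py
  rw [pvA_eq_canon, pvB_eq_canon]
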